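-- pv_equiv track=rewrite | github.com/2-ring/hack-brown | backend/pattern_analysis_service.py | _get_latest_event_date
-- ===== SOURCE A (Python) =====
-- from typing import List, Dict, Optional
--
-- def _get_latest_event_date(events: List[Dict]) -> Optional[str]:
--     """Get latest event date from list"""
--     if not events:
--         return None
--
--     dates = []
--     for event in events:
--         start = event.get('start', {})
--         date_str = start.get('dateTime') or start.get('date')
--         if date_str:
--             dates.append(date_str)
--
--     return max(dates) if dates else None
-- ===== SOURCE B (Python) =====
-- from typing import List, Dict, Optional
--
-- def _get_latest_event_date(events: List[Dict]) -> Optional[str]: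
--     """Get latest event date from list (sort the dates, take the last)."""
--     dates = sorted(
--         date_str
--         for event in events
--         if (date_str := event.get('start', {}).get('dateTime')
--             or event.get('start', {}).get('date'))
--     )
--     return dates[-1] if dates else None
-- ===== Notes on version B (the rewrite author's own statement) =====
-- stated objective: alternative
-- what changed: B collects the date strings with a comprehension, sorts them ascending, and returns the last element of the sorted list, instead of A's explicit append loop followed by a max() scan; correct because the last element of an ascending sort is the maximum.
import Mathlib
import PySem

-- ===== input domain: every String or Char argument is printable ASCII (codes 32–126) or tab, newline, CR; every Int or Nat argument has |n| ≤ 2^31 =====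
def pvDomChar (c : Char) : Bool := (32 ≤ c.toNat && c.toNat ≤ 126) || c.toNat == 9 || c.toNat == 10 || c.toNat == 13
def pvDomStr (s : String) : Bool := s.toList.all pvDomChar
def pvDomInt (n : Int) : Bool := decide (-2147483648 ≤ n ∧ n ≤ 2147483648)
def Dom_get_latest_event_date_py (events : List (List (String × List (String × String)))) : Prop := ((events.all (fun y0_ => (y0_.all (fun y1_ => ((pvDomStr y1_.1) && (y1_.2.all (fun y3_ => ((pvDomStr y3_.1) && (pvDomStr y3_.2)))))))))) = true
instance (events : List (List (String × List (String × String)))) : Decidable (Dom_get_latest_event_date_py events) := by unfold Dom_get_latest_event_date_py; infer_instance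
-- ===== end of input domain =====

-- B is an alternative algorithm: collect the dates by comprehension, sort ascending, return the last element, instead of A's append loop plus max() scan.

-- ===== PORT A =====
-- start = event.get('start', {}); date_str = start.get('dateTime') or start.get('date')
def pvDateOf (event : List (String × List (String × String))) : Option String :=
  let start := (List.lookup "start" event).getD []   -- event.get('start', {}): first match in the assoc list
  match List.lookup "dateTime" start with
  | some s => if s = "" then List.lookup "date" start else some s   -- Python `or`: '' is falsy
  | none => List.lookup "date" start

def get_latest_event_date_py (events : List (List (String × List (String × String)))) : Option String :=
  if events = [] then none
  else
    let dates := events.foldl (fun acc event =>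
      match pvDateOf event with
      | some s => if s = "" then acc else acc ++ [s]   -- `if date_str:` filters None and ''
      | none => acc) []
    if dates = [] then none else PySem.List.max? dates (fun x => x)

-- ===== PORT B =====
-- the comprehension element: event.get('start', {}).get('dateTime') or event.get('start', {}).get('date'), kept only if truthy
def pvDatesOf (event : List (String × List (String × String))) : List String :=
  match List.lookup "dateTime" ((List.lookup "start" event).getD []) with
  | some s =>
      if s = "" then
        match List.lookup "date" ((List.lookup "start" event).getD []) with
        | some t => if t = "" then [] else [t]
        | none => []
      else [s]
  | none =>
      match List.lookup "date" ((List.lookup "start" event).getD []) with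
      | some t => if t = "" then [] else [t]
      | none => []

def get_latest_event_date_py_alt (events : List (List (String × List (String × String)))) : Option String :=
  let dates := PySem.List.sorted (events.flatMap pvDatesOf) (fun x => x) false
  if dates = [] then none else PySem.List.pyGet? dates (-1)   -- dates[-1] if dates else None

-- ===== PRECONDITION & SPEC =====
def Spec_get_latest_event_date_py (events : List (List (String × List (String × String)))) (out : Option String) : Prop := out = get_latest_event_date_py_alt events
instance (events : List (List (String × List (String × String)))) (out : Option String) : Decidable (Spec_get_latest_event_date_py events out) := by unfold Spec_get_latest_event_date_py; infer_instance

-- ===== CLAIM =====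
def Claim_equal_get_latest_event_date_py : Prop := ∀ (events : List (List (String × List (String × String)))), Dom_get_latest_event_date_py events → Spec_get_latest_event_date_py events (get_latest_event_date_py events)

-- ===== LEMMAS AND PROOFS =====

-- in a ≤-pairwise (ascending) list, every element is ≤ the last one
lemma pv_le_getLast? {α : Type} [Preorder α] (l : List α) (hp : l.Pairwise (· ≤ ·))
    (a m : α) (ha : a ∈ l) (hm : l.getLast? = some m) : a ≤ m := by
  induction l with
  | nil => cases ha
  | cons x t ih =>
    rcases List.pairwise_cons.mp hp with ⟨hx, ht⟩
    cases t with
    | nil =>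
      simp at hm ha; subst hm; subst ha; exact le_refl _
    | cons y u =>
      have hm' : (y :: u).getLast? = some m := by
        simpa [List.getLast?_cons_cons] using hm
      rcases List.mem_cons.mp ha with ha | ha
      · have hmmem : m ∈ y :: u := List.mem_of_getLast? hm'
        exact (ha ▸ hx m hmmem)
      · exact ih ht ha hm'

-- A's dates list (the foldl with appends) is B's flatMap comprehension
lemma pv_dates_eq (events : List (List (String × List (String × String)))) (acc : List String) :
    events.foldl (fun acc event =>
      match pvDateOf event with
      | some s => if s = "" then acc else acc ++ [s]
      | none => acc) acc
    = acc ++ events.flatMap pvDatesOf := by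
  induction events generalizing acc with
  | nil => simp
  | cons e es ih =>
    simp only [List.foldl, List.flatMap_cons]
    have he : (match pvDateOf e with
      | some s => if s = "" then acc else acc ++ [s]
      | none => acc) = acc ++ pvDatesOf e := by
      unfold pvDateOf pvDatesOf
      rcases h1 : List.lookup "dateTime" ((List.lookup "start" e).getD []) with _ | s
      · rcases h2 : List.lookup "date" ((List.lookup "start" e).getD []) with _ | t
        · simp [h1, h2]
        · by_cases ht : t = "" <;> simp [h1, h2, ht]
      · by_cases hs : s = ""
        · rcases h2 : List.lookup "date" ((List.lookup "start" e).getD []) with _ | t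
          · simp [h1, h2, hs]
          · by_cases ht : t = "" <;> simp [h1, h2, hs, ht]
        · simp [h1, hs]
    rw [he, ih, List.append_assoc]

-- the last element of the ascending sort is max(xs)
lemma pv_last_sorted_eq_max (xs : List String) (hne : xs ≠ []) :
    (PySem.List.sorted xs (fun x => x) false).getLast? = PySem.List.max? xs (fun x => x) := by
  set ys := PySem.List.sorted xs (fun x => x) false with hys
  have hperm : ys.Perm xs := PySem.List.sorted_perm xs (fun x => x) false
  have hyne : ys ≠ [] := by
    intro h
    exact hne ((PySem.List.sorted_eq_nil_iff xs (fun x => x) false).mp (hys ▸ h))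
  rcases hl : ys.getLast? with _ | l
  · exact absurd (List.getLast?_eq_none_iff.mp hl) hyne
  rcases hm : PySem.List.max? xs (fun x => x) with _ | m
  · exact absurd ((PySem.List.max?_eq_none_iff (xs := xs) (key := fun x => x)).mp hm) hne
  have hlmem : l ∈ xs := hperm.mem_iff.mp (List.mem_of_getLast? hl)
  have hmmem : m ∈ ys := hperm.mem_iff.mpr (PySem.List.max?_mem hm)
  have hpw : ys.Pairwise (· ≤ ·) := by
    simpa using (PySem.List.sorted_pairwise (xs := xs) (key := fun x => x))
  have h1 : m ≤ l := pv_le_getLast? ys hpw m l hmmem hl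
  have h2 : l ≤ m := PySem.List.max?_isMax hm l hlmem
  exact congrArg some (le_antisymm h2 h1)

-- ===== VERDICT =====
theorem get_latest_event_date_py_spec : Claim_equal_get_latest_event_date_py := by
  intro events _
  show get_latest_event_date_py events = get_latest_event_date_py_alt events
  unfold get_latest_event_date_py get_latest_event_date_py_alt
  have hd := pv_dates_eq events []
  simp only [List.nil_append] at hd
  by_cases hne : events = []
  · subst hne; rfl
  · rw [if_neg hne, hd]
    by_cases hfe : events.flatMap pvDatesOf = []
    · simp [hfe, PySem.List.sorted_eq_nil_iff]
    · rw [if_neg hfe,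
        if_neg (fun h => hfe ((PySem.List.sorted_eq_nil_iff _ (fun x => x) false).mp h)),
        PySem.List.pyGet?_neg_one,
        pv_last_sorted_eq_max _ hfe]
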